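-- pv_equiv track=rewrite | github.com/siddaramm/configurator-exporter | stat_exporter/collectd_exporter.py | get_file_list
-- ===== SOURCE A (Python) =====
-- def get_file_list(num_samples, last_index, max_entries):
--     file_list = []
--     if num_samples > max_entries:
--         count = max_entries
--     else:
--         count = num_samples
--     while count > 0:
--         if last_index < 0:
--             last_index = max_entries - 1
--         file_list.append(str(last_index % max_entries) + ".txt")
--         last_index -= 1
--         count -= 1
--     return file_list
-- ===== SOURCE B (Python) =====
-- def get_file_list(num_samples, last_index, max_entries):
--     count = min(num_samples, max_entries)
--     if count <= 0:
--         return []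
--     start = last_index % max_entries if last_index >= 0 else max_entries - 1
--     head = list(range(start, max(start - count, -1), -1))
--     tail = list(range(max_entries - 1, max_entries - 1 - (count - len(head)), -1))
--     return [str(j) + ".txt" for j in head + tail]
-- ===== Notes on version B (the rewrite author's own statement) =====
-- stated objective: alternative
-- what changed: Instead of A's mutating loop (decrement a running index, reset it in-loop when negative, take one mod per entry), B resolves the wraparound once: it splits the output into at most two contiguous descending integer ranges (from the normalized start down to 0, then from max_entries-1 down), concatenates them, and formats the joined list.
import Mathlib
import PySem

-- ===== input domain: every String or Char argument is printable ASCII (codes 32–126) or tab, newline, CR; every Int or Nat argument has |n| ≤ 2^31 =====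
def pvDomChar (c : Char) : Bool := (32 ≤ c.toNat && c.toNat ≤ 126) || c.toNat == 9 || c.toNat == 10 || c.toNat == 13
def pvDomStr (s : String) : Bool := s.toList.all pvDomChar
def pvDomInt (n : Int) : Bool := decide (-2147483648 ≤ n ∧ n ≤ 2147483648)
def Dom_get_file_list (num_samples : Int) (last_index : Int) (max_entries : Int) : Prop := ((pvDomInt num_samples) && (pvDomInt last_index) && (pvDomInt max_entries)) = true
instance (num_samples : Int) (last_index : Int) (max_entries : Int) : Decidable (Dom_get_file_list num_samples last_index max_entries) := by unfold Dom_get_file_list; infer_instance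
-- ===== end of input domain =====

-- B replaces A's per-element mutating loop (decrement + in-loop negative-reset branch, one mod
-- per entry) by a staged construction: resolve the wraparound ONCE by splitting the output into
-- two contiguous descending ranges, concatenate them, then format (objective: alternative).


-- ===== PORT A =====
-- the while loop: runs exactly count.toNat times (count decreases by 1 each iteration)
def get_file_list_go (max_entries : Int) (last_index : Int) (fuel : Nat) (acc : List String) : List String :=
  match fuel with
  | 0 => acc
  | n + 1 =>
    let li := if last_index < 0 then max_entries - 1 else last_index
    get_file_list_go max_entries (li - 1) n
      (acc ++ [PySem.Int.toStr (PySem.Int.mod li max_entries) ++ ".txt"])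

def get_file_list (num_samples : Int) (last_index : Int) (max_entries : Int) : List String :=
  let count := if num_samples > max_entries then max_entries else num_samples
  get_file_list_go max_entries last_index count.toNat []

-- ===== PORT B =====
def get_file_list_alt (num_samples : Int) (last_index : Int) (max_entries : Int) : List String :=
  let count := min num_samples max_entries
  if count ≤ 0 then []
  else
    let start := if last_index ≥ 0 then PySem.Int.mod last_index max_entries else max_entries - 1
    let head := PySem.List.pyRange start (max (start - count) (-1)) (-1)
    let tail := PySem.List.pyRange (max_entries - 1)
      (max_entries - 1 - (count - (head.length : Int))) (-1)
    (head ++ tail).map (fun j => PySem.Int.toStr j ++ ".txt")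

-- ===== PRECONDITION & SPEC =====
def Spec_get_file_list (num_samples : Int) (last_index : Int) (max_entries : Int) (out : List String) : Prop := out = get_file_list_alt num_samples last_index max_entries
instance (num_samples : Int) (last_index : Int) (max_entries : Int) (out : List String) : Decidable (Spec_get_file_list num_samples last_index max_entries out) := by unfold Spec_get_file_list; infer_instance

-- ===== CLAIM (what is proved, stated in full; the proofs are below) =====
def Claim_equal_get_file_list : Prop := ∀ (num_samples : Int) (last_index : Int) (max_entries : Int), Dom_get_file_list num_samples last_index max_entries → Spec_get_file_list num_samples last_index max_entries (get_file_list num_samples last_index max_entries)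

-- ===== LEMMAS AND PROOFS =====

-- closed form of A's loop: the k-th appended entry is (start - k) % max_entries
theorem pv_go_closed (m : Int) (hm : 0 < m) :
    ∀ (fuel : Nat) (l : Int) (acc : List String),
      get_file_list_go m l fuel acc =
        acc ++ (List.range fuel).map
          (fun k : Nat => PySem.Int.toStr
              (PySem.Int.mod ((if l < 0 then m - 1 else l) - (k : Int)) m) ++ ".txt") := by
  intro fuel
  induction fuel with
  | zero => intro l acc; simp [get_file_list_go]
  | succ n ih =>
    intro l acc
    have hstep : get_file_list_go m l (n+1) acc =
        get_file_list_go m ((if l < 0 then m - 1 else l) - 1) n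
          (acc ++ [PySem.Int.toStr (PySem.Int.mod (if l < 0 then m - 1 else l) m) ++ ".txt"]) := rfl
    rw [hstep, ih]
    set li : Int := if l < 0 then m - 1 else l with hli
    have hli0 : 0 ≤ li := by by_cases h : l < 0 <;> simp [hli, h] <;> omega
    rw [List.range_succ_eq_map, List.map_cons, List.map_map, List.append_assoc,
      List.singleton_append]
    congr 2
    · norm_num
    · apply List.map_congr_left
      intro k _
      simp only [Function.comp_apply]
      congr 2
      rw [PySem.Int.mod_eq_emod_of_pos hm, PySem.Int.mod_eq_emod_of_pos hm]
      by_cases h : li - 1 < 0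
      · have hz : li = 0 := by omega
        simp only [h, if_pos]
        have he : m - 1 - (k : Int) = li - ((k : Int) + 1) + m * 1 := by omega
        rw [he, Int.add_mul_emod_self_left]
        push_cast
        ring_nf
      · simp only [h, if_neg, not_false_iff]
        congr 1
        push_cast
        ring

-- B's two descending segments concatenated are exactly the modular countdown sequence
theorem pv_split_ring (m s0 : Int) (c : Nat) (hs0 : 0 ≤ s0) (hs0m : s0 < m) (hc : (c : Int) ≤ m) :
    (List.range (s0 - max (s0 - (c : Int)) (-1)).toNat).map (fun k : Nat => s0 - (k : Int))
      ++ (List.range (m - 1 - (m - 1 - ((c : Int) - ((s0 - max (s0 - (c : Int)) (-1)).toNat : Int)))).toNat).map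
          (fun k : Nat => m - 1 - (k : Int))
    = (List.range c).map (fun k : Nat => (s0 - (k : Int)) % m) := by
  set h : Nat := (s0 - max (s0 - (c : Int)) (-1)).toNat with hh
  have hhint : (h : Int) = min (c : Int) (s0 + 1) := by
    simp only [hh]; omega
  have hle : h ≤ c := by omega
  have htail : (m - 1 - (m - 1 - ((c : Int) - (h : Int)))).toNat = c - h := by omega
  rw [htail]
  have hc' : c = h + (c - h) := by omega
  rw [hc', List.range_add, List.map_append]
  congr 1
  · apply List.map_congr_left
    intro k hk
    simp only [List.mem_range] at hk
    rw [Int.emod_eq_of_lt (by omega) (by omega)]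
  · rw [List.map_map]
    simp only [Nat.add_sub_cancel_left]
    apply List.map_congr_left
    intro k hk
    simp only [List.mem_range, Function.comp_apply] at hk ⊢
    -- tail nonempty forces h = s0 + 1
    have hhs : (h : Int) = s0 + 1 := by omega
    have he : s0 - ((h : Int) + (k : Int)) = m - 1 - (k : Int) + m * (-1) := by omega
    push_cast
    rw [show s0 - ((h : Int) + (k : Int)) = m - 1 - (k : Int) + m * (-1) from he,
      Int.add_mul_emod_self_left, Int.emod_eq_of_lt (by omega) (by omega)]

theorem pv_equiv (n l m : Int) : get_file_list n l m = get_file_list_alt n l m := by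
  unfold get_file_list get_file_list_alt
  dsimp only
  have hcount : (if n > m then m else n) = min n m := by
    rw [min_def]; split_ifs <;> omega
  rw [hcount]
  by_cases hc : min n m ≤ 0
  · rw [if_pos hc]
    have h1 : (min n m).toNat = 0 := by omega
    rw [h1]; rfl
  · rw [if_neg hc]
    have hm : 0 < m := by omega
    set s0 : Int := if l ≥ 0 then PySem.Int.mod l m else m - 1 with hs0def
    have hs0 : 0 ≤ s0 := by
      by_cases h : l ≥ 0
      · simp only [hs0def, if_pos h, PySem.Int.mod_eq_emod_of_pos hm]
        exact Int.emod_nonneg l (by omega)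
      · simp only [hs0def, if_neg h]; omega
    have hs0m : s0 < m := by
      by_cases h : l ≥ 0
      · simp only [hs0def, if_pos h, PySem.Int.mod_eq_emod_of_pos hm]
        exact Int.emod_lt_of_pos l hm
      · simp only [hs0def, if_neg h]; omega
    rw [pv_go_closed m hm (min n m).toNat l [], List.nil_append]
    rw [PySem.List.pyRange_neg_one, PySem.List.pyRange_neg_one]
    simp only [List.length_map, List.length_range]
    set c : Nat := (min n m).toNat with hcdef
    have hmin : min n m = (c : Int) := by omega
    rw [hmin, pv_split_ring m s0 c hs0 hs0m (by omega), List.map_map]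
    apply List.map_congr_left
    intro k _
    simp only [Function.comp_apply]
    congr 2
    rw [PySem.Int.mod_eq_emod_of_pos hm]
    by_cases h : l < 0
    · have : ¬ l ≥ 0 := by omega
      simp only [hs0def, if_neg this, h, if_pos]
    · have hge : l ≥ 0 := by omega
      simp only [hs0def, if_pos hge, h, if_neg, not_false_iff,
        PySem.Int.mod_eq_emod_of_pos hm]
      conv_lhs => rw [Int.sub_emod]
      conv_rhs => rw [Int.sub_emod]
      rw [Int.emod_emod_of_dvd _ dvd_rfl]

-- ===== VERDICT (by name: the statement is the Claim_ definition above) =====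
theorem get_file_list_spec : Claim_equal_get_file_list := by
  intro n l m _
  unfold Spec_get_file_list
  exact pv_equiv n l m
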